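-- pv_equiv track=rewrite | github.com/chaec0803/Programmers | choosingDice.py | solution
-- ===== SOURCE A (Python) =====
-- from bisect import bisect_left
-- from itertools import combinations
--
-- def solution(dice):
--     n = len(dice)
--     half = n // 2
--     all_idx = set(range(n))
--
--     def get_sums(group):
--         sums = [0]
--         for idx in group:
--             new_sums = []
--             for s in sums:
--                 for val in dice[idx]:
--                     new_sums.append(s + val)
--             sums = new_sums
--         return sums
--
--     best_group = None
--     max_wins = -1
--
--     # only generate one side of each complementary pair
--     # force 0 to be included
--     for comb in combinations(range(1, n), half - 1):
--         group_a = (0,) + comb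
--         group_b = tuple(sorted(all_idx - set(group_a)))
--
--         sums_a = get_sums(group_a)
--         sums_b = sorted(get_sums(group_b))
--
--         wins = 0
--         for s in sums_a:
--             wins += bisect_left(sums_b, s)
--
--         if wins > max_wins:
--             max_wins = wins
--             best_group = group_a
--
--     return [x + 1 for x in best_group]
-- ===== SOURCE B (Python) =====
-- def solution(dice):
--     n = len(dice)
--     half = n // 2
--
--     def sums_of(group):
--         # recursive cartesian product-sum (head die outermost)
--         if not group:
--             return [0]
--         head, *rest = group
--         tails = sums_of(rest)
--         return [v + s for v in dice[head] for s in tails]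
--
--     def wins_of(ga):
--         gb = [i for i in range(n) if i not in ga]
--         sa = sorted(sums_of(ga))
--         sb = sorted(sums_of(gb))
--         la = len(sa)
--         # scan sb; for each b add the number of a's strictly greater than b
--         # (a suffix of sorted sa); the pointer i only moves forward
--         total = 0
--         i = 0
--         for b in sb:
--             while i < la and sa[i] <= b:
--                 i += 1
--             total += la - i
--         return total
--
--     def groups(start, need):
--         # DFS enumeration; same lexicographic order as itertools.combinations
--         if need == 0:
--             return [[]]
--         res = []
--         for x in range(start, n):
--             for tail in groups(x + 1, need - 1):
--                 res.append([x] + tail)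
--         return res
--
--     cands = [[0] + c for c in groups(1, half - 1)]
--     best = max(cands, key=wins_of)  # max keeps the first argmax, like A's strict '>'
--     return [x + 1 for x in best]
-- ===== Notes on version B (the rewrite author's own statement) =====
-- stated objective: alternative
-- what changed: B replaces itertools.combinations with a recursive DFS enumeration of the index groups, the foldl product-sum loop with a recursive cartesian product-sum, the per-element bisect_left win count with a two-pointer sweep over the OTHER list (for each b in sorted sums_b it adds the number of a's strictly greater, a suffix of sorted sums_a), and the running best-group accumulator with a generate-all-candidates-then-max(key=) selection.
import Mathlib
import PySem

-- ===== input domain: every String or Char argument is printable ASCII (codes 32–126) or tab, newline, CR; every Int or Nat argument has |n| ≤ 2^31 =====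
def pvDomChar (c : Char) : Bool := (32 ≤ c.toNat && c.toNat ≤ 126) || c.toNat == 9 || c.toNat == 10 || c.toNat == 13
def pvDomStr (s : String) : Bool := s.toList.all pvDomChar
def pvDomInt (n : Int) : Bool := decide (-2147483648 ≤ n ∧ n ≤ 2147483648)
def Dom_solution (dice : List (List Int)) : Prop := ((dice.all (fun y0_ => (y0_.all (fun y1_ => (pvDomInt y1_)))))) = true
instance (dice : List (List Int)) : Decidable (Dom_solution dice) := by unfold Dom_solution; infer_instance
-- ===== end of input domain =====

-- B replaces combinations() by a DFS enumeration, the product-sum loop by recursion,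
-- the bisect_left win count by a suffix-counting sweep over sorted sums_b, and the
-- running-best accumulator by max(key=) over the candidate list (objective: alternative).

-- ===== PORT A =====
-- get_sums: nested loops building the product sums (foldl over the group)
def getSums (dice : List (List Int)) (group : List Nat) : List Int :=
  group.foldl (fun sums idx => sums.flatMap (fun s => (dice.getD idx []).map (fun v => s + v))) [0]

def solution (dice : List (List Int)) : List Int :=
  let n := dice.length
  let half := n / 2
  let r := (PySem.List.combinations (List.range' 1 (n - 1)) (half - 1)).foldl
    (fun (st : Option (List Nat) × Int) (comb : List Nat) =>
      let ga := 0 :: comb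
      let gb := PySem.List.sorted ((List.range n).filter (fun i => !(ga.contains i))) (fun x => x) false
      let sumsA := getSums dice ga
      let sumsB := PySem.List.sorted (getSums dice gb) (fun x => x) false
      let wins := sumsA.foldl (fun w s => w + (PySem.List.bisectLeft sumsB s : Int)) 0
      if wins > st.2 then (some ga, wins) else st) (none, -1)
  match r.1 with
  | some g => g.map (fun x => (x : Int) + 1)
  | none => []  -- unreachable under Pre_solution (Python raises TypeError there)

-- ===== PORT B =====
-- sums_of: recursive cartesian product-sum (head die outermost)
def sumsOf (dice : List (List Int)) : List Nat → List Int
  | [] => [0]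
  | i :: rest => (dice.getD i []).flatMap (fun v => (sumsOf dice rest).map (fun s => v + s))

-- inner `while i < la and sa[i] <= b: i += 1`
def sweep (sa : List Int) (b : Int) (i : Nat) : Nat :=
  if h : i < sa.length ∧ sa.getD i 0 ≤ b then sweep sa b (i + 1) else i
termination_by sa.length - i
decreasing_by omega

-- wins_of: scan sorted sums_b, adding for each b the strictly-greater suffix of sorted sums_a
def winsOf (dice : List (List Int)) (n : Nat) (ga : List Nat) : Int :=
  let gb := (List.range n).filter (fun i => !(ga.contains i))
  let sa := PySem.List.sorted (sumsOf dice ga) (fun x => x) false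
  let sb := PySem.List.sorted (sumsOf dice gb) (fun x => x) false
  (sb.foldl (fun (st : Nat × Int) b =>
      let i := sweep sa b st.1
      (i, st.2 + ((sa.length : Int) - (i : Int)))) (0, 0)).2

-- groups(start, need): DFS enumeration, lexicographic like itertools.combinations
def groupsB (n : Nat) : Nat → Nat → List (List Nat)
  | _, 0 => [[]]
  | start, need + 1 =>
      (List.range' start (n - start)).flatMap
        (fun x => (groupsB n (x + 1) need).map (fun t => x :: t))

-- max(cands, key=f): first argmax, key computed once per element
def selectMax (f : List Nat → Int) (c0 : List Nat) (cs : List (List Nat)) : List Nat :=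
  (cs.foldl (fun (st : List Nat × Int) c =>
      let k := f c
      if k > st.2 then (c, k) else st) (c0, f c0)).1

def solution_alt (dice : List (List Int)) : List Int :=
  let n := dice.length
  let half := n / 2
  let cands := (groupsB n 1 (half - 1)).map (fun c => 0 :: c)
  match cands with
  | [] => []  -- unreachable under Pre_solution (Python max raises ValueError there)
  | c0 :: rest => (selectMax (winsOf dice n) c0 rest).map (fun x => (x : Int) + 1)

-- ===== PRECONDITION & SPEC =====
-- Pre_ excludes dice with fewer than two dice, on which Python A raises
-- (TypeError/ValueError: no candidate group exists); Python B raises there too.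
def Pre_solution (dice : List (List Int)) : Prop := 2 ≤ dice.length
instance (dice : List (List Int)) : Decidable (Pre_solution dice) := by unfold Pre_solution; infer_instance
def pvWitness_solution : List (List Int) := [[1, 2], [3, 4]]
def Spec_solution (dice : List (List Int)) (out : List Int) : Prop := out = solution_alt dice
instance (dice : List (List Int)) (out : List Int) : Decidable (Spec_solution dice out) := by unfold Spec_solution; infer_instance

-- ===== CLAIM (what is proved, stated in full; the proofs are below) =====
def Claim_equal_solution : Prop := ∀ (dice : List (List Int)), Dom_solution dice → Pre_solution dice → Spec_solution dice (solution dice)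

-- ===== LEMMAS AND PROOFS =====

-- A's per-combination win computation, factored out for the proof
def wA (dice : List (List Int)) (n : Nat) (ga : List Nat) : Int :=
  let gb := PySem.List.sorted ((List.range n).filter (fun i => !(ga.contains i))) (fun x => x) false
  let sumsA := getSums dice ga
  let sumsB := PySem.List.sorted (getSums dice gb) (fun x => x) false
  sumsA.foldl (fun w s => w + (PySem.List.bisectLeft sumsB s : Int)) 0

-- characterize countP (· < a) on a sorted list: it is the length of the strict prefix
theorem countP_lt_char (l : List Int) (a : Int) (hs : l.Pairwise (· ≤ ·)) :
    ∀ i (hi : i < l.length), (l[i] < a ↔ i < l.countP (fun b => decide (b < a))) := by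
  induction l with
  | nil => intro i hi; simp at hi
  | cons x t ih =>
    intro i hi
    rcases List.pairwise_cons.mp hs with ⟨hx, ht⟩
    by_cases hxa : x < a
    · cases i with
      | zero => simp [hxa]
      | succ j =>
        have := ih ht j (by simpa using hi)
        simp only [List.countP_cons, hxa]
        simpa [Nat.succ_lt_succ_iff] using this
    · have hz : t.countP (fun b => decide (b < a)) = 0 := by
        rw [List.countP_eq_zero]
        intro b hb
        have := hx b hb
        simp; omega
      cases i with
      | zero => simp [hxa, hz]
      | succ j =>
        have hjt : j < t.length := by simpa using hi
        have hb := hx (t[j]) (List.getElem_mem hjt)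
        simp [hxa, hz]
        omega

-- the ≤ twin: countP (· ≤ b) is the length of the weak prefix
theorem countP_le_char (l : List Int) (a : Int) (hs : l.Pairwise (· ≤ ·)) :
    ∀ i (hi : i < l.length), (l[i] ≤ a ↔ i < l.countP (fun b => decide (b ≤ a))) := by
  induction l with
  | nil => intro i hi; simp at hi
  | cons x t ih =>
    intro i hi
    rcases List.pairwise_cons.mp hs with ⟨hx, ht⟩
    by_cases hxa : x ≤ a
    · cases i with
      | zero => simp [hxa]
      | succ j =>
        have := ih ht j (by simpa using hi)
        simp only [List.countP_cons, hxa]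
        simpa [Nat.succ_lt_succ_iff] using this
    · have hz : t.countP (fun b => decide (b ≤ a)) = 0 := by
        rw [List.countP_eq_zero]
        intro b hb
        have := hx b hb
        simp; omega
      cases i with
      | zero => simp [hxa, hz]
      | succ j =>
        have hjt : j < t.length := by simpa using hi
        have hb := hx (t[j]) (List.getElem_mem hjt)
        simp [hxa, hz]
        omega

theorem countP_le_length (l : List Int) (p : Int → Bool) : l.countP p ≤ l.length :=
  List.countP_le_length

-- bisect_left on a sorted list counts the elements strictly below x
theorem bisectLeft_eq_countP (l : List Int) (x : Int) (hs : l.Pairwise (· ≤ ·)) :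
    PySem.List.bisectLeft l x = l.countP (fun b => decide (b < x)) := by
  obtain ⟨hle, hlt, hge⟩ := PySem.List.bisectLeft_spec l x hs
  set k := PySem.List.bisectLeft l x with hk
  have hc := countP_lt_char l x hs
  have hcl := countP_le_length l (fun b => decide (b < x))
  by_contra hne
  rcases Nat.lt_or_ge k (l.countP (fun b => decide (b < x))) with h | h
  · have hkl : k < l.length := lt_of_lt_of_le h hcl
    have := (hc k hkl).mpr h
    have := hge k hkl le_rfl
    omega
  · have h' : l.countP (fun b => decide (b < x)) < k := by omega
    have hcl2 : l.countP (fun b => decide (b < x)) < l.length := lt_of_lt_of_le h' hle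
    have h1 := hlt _ hcl2 h'
    have h2 := (hc _ hcl2).mp h1
    omega

-- A's bisect loop computes the sum of per-element strict-lower counts
theorem winsA_eq (sumsA sumsB : List Int) (hb : sumsB.Pairwise (· ≤ ·)) :
    sumsA.foldl (fun w s => w + (PySem.List.bisectLeft sumsB s : Int)) 0
      = (sumsA.map (fun x => (sumsB.countP (fun b => decide (b < x)) : Int))).sum := by
  rw [PySem.List.foldl_add]
  simp only [zero_add]
  congr 1
  exact List.map_congr_left (fun x _ => by rw [bisectLeft_eq_countP sumsB x hb])

-- sorting the already-increasing filtered range is the identity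
theorem sorted_filter_range (n : Nat) (p : Nat → Bool) :
    PySem.List.sorted ((List.range n).filter p) (fun x => x) false = (List.range n).filter p := by
  apply PySem.List.sorted_eq_self_of_pairwise
  have h : ((List.range n).filter p).Pairwise (· < ·) :=
    List.Pairwise.sublist List.filter_sublist List.pairwise_lt_range
  exact h.imp (fun h => le_of_lt h)

-- the while loop advances i to exactly countP (· ≤ b), provided it starts at or below it
theorem sweep_eq (sa : List Int) (b : Int) (hs : sa.Pairwise (· ≤ ·)) :
    ∀ i, i ≤ sa.countP (fun t => decide (t ≤ b)) →
      sweep sa b i = sa.countP (fun t => decide (t ≤ b)) := by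
  intro i hi
  set c := sa.countP (fun t => decide (t ≤ b)) with hc
  have hcl := countP_le_length sa (fun t => decide (t ≤ b))
  have hchar := countP_le_char sa b hs
  induction hn : c - i generalizing i with
  | zero =>
    have hic : i = c := by omega
    rw [sweep]
    have hng : ¬ (i < sa.length ∧ sa.getD i 0 ≤ b) := by
      rintro ⟨h1, h2⟩
      have := (hchar i h1).mp (by rwa [List.getD_eq_getElem sa 0 h1] at h2)
      omega
    rw [dif_neg hng]
    exact hic
  | succ m ih =>
    have hic : i < c := by omega
    have hil : i < sa.length := lt_of_lt_of_le hic hcl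
    have hle : sa.getD i 0 ≤ b := by
      rw [List.getD_eq_getElem sa 0 hil]
      exact (hchar i hil).mpr hic
    rw [sweep, dif_pos ⟨hil, hle⟩]
    exact ih (i + 1) (by omega) (by omega)

-- the sweep loop computes the sum of per-element strictly-greater suffix sizes
theorem sweepFold (sa : List Int) (ha : sa.Pairwise (· ≤ ·)) :
    ∀ (sb : List Int), sb.Pairwise (· ≤ ·) →
      ∀ (j : Nat) (w : Int), (∀ x ∈ sb, j ≤ sa.countP (fun t => decide (t ≤ x))) →
      (sb.foldl (fun (st : Nat × Int) b =>
          let i := sweep sa b st.1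
          (i, st.2 + ((sa.length : Int) - (i : Int)))) (j, w)).2
        = w + (sb.map (fun b =>
            (sa.length : Int) - (sa.countP (fun t => decide (t ≤ b)) : Int))).sum := by
  intro sb
  induction sb with
  | nil => intro _ j w _; simp
  | cons b t ih =>
    intro hp j w hstart
    rcases List.pairwise_cons.mp hp with ⟨hb, ht⟩
    have hsw : sweep sa b j = sa.countP (fun t => decide (t ≤ b)) :=
      sweep_eq sa b ha j (hstart b List.mem_cons_self)
    simp only [List.foldl_cons, hsw]
    rw [ih ht _ _ ?_]
    · simp [List.map_cons, List.sum_cons]; ring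
    · intro x hx
      exact List.countP_mono_left (fun v _ hv => by
        simp at hv ⊢; exact le_trans hv (hb x hx))

-- (map (f+g)).sum splits
theorem sum_map_split (l : List Int) (f g : Int → Int) :
    (l.map (fun x => f x + g x)).sum = (l.map f).sum + (l.map g).sum := by
  induction l with
  | nil => simp
  | cons x t ih => simp [ih]; ring

-- a 0/1 sum is a count
theorem sum_map_indicator (l : List Int) (a : Int) :
    (l.map (fun b => if b < a then (1 : Int) else 0)).sum
      = (l.countP (fun b => decide (b < a)) : Int) := by
  induction l with
  | nil => simp
  | cons x t ih =>
    by_cases h : x < a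
    · simp [h, ih]; ring
    · simp [h, ih]

-- double counting: per-a lower counts in sb sum to per-b upper counts in sa
theorem swap_sum : ∀ (sa sb : List Int),
    (sa.map (fun a => (sb.countP (fun b => decide (b < a)) : Int))).sum
      = (sb.map (fun b => (sa.countP (fun a => decide (b < a)) : Int))).sum := by
  intro sa
  induction sa with
  | nil => intro sb; simp
  | cons a t ih =>
    intro sb
    simp only [List.map_cons, List.sum_cons, ih sb]
    have : (sb.map (fun b => ((a :: t).countP (fun x => decide (b < x)) : Int))).sum
        = (sb.map (fun b => (if b < a then (1 : Int) else 0)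
              + (t.countP (fun x => decide (b < x)) : Int))).sum := by
      apply congrArg
      apply List.map_congr_left
      intro b _
      rw [List.countP_cons]
      by_cases h : b < a <;> simp [h] <;> ring
    rw [this, sum_map_split, sum_map_indicator]

-- counting at most b plus strictly above b is everything
theorem countP_le_add_lt (l : List Int) (b : Int) :
    l.countP (fun t => decide (t ≤ b)) + l.countP (fun t => decide (b < t)) = l.length := by
  induction l with
  | nil => simp
  | cons x t ih =>
    simp only [List.countP_cons, List.length_cons]
    by_cases h : x ≤ b
    · have h2 : ¬ b < x := by omega
      simp [h, h2]; omega
    · have h2 : b < x := by omega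
      simp [h, h2]; omega

-- A's foldl product-sum loop equals B's recursive cartesian product-sum
theorem getSums_flat (dice : List (List Int)) :
    ∀ (g : List Nat) (sums : List Int),
      g.foldl (fun sums idx => sums.flatMap (fun s => (dice.getD idx []).map (fun v => s + v))) sums
        = sums.flatMap (fun s => (sumsOf dice g).map (fun t => s + t)) := by
  intro g
  induction g with
  | nil => intro sums; simp [sumsOf]
  | cons i rest ih =>
    intro sums
    simp only [List.foldl_cons, ih, sumsOf]
    simp [List.flatMap_assoc, List.map_flatMap, List.flatMap_map, add_assoc]

theorem getSums_eq_sumsOf (dice : List (List Int)) (g : List Nat) :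
    getSums dice g = sumsOf dice g := by
  unfold getSums
  rw [getSums_flat]
  simp

-- per-candidate win counts agree
theorem wins_agree (dice : List (List Int)) (n : Nat) (ga : List Nat) :
    wA dice n ga = winsOf dice n ga := by
  unfold wA winsOf
  simp only [sorted_filter_range, getSums_eq_sumsOf]
  set sA := sumsOf dice ga with hsA
  set sB := sumsOf dice ((List.range n).filter (fun i => !(ga.contains i))) with hsB
  have hbs : (PySem.List.sorted sB (fun x => x) false).Pairwise (· ≤ ·) := by
    simpa using PySem.List.sorted_pairwise sB (fun x => x)
  have has : (PySem.List.sorted sA (fun x => x) false).Pairwise (· ≤ ·) := by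
    simpa using PySem.List.sorted_pairwise sA (fun x => x)
  rw [winsA_eq _ _ hbs]
  rw [sweepFold _ has _ hbs 0 0 (fun x _ => Nat.zero_le _), zero_add]
  have hperm : (sA.map (fun x =>
      ((PySem.List.sorted sB (fun x => x) false).countP (fun b => decide (b < x)) : Int))).sum
      = ((PySem.List.sorted sA (fun x => x) false).map (fun x =>
      ((PySem.List.sorted sB (fun x => x) false).countP (fun b => decide (b < x)) : Int))).sum :=
    (List.Perm.sum_eq (List.Perm.map _ (PySem.List.sorted_perm sA (fun x => x) false))).symm
  rw [hperm, swap_sum]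
  apply congrArg
  apply List.map_congr_left
  intro b _
  have := countP_le_add_lt (PySem.List.sorted sA (fun x => x) false) b
  have hlen : (PySem.List.sorted sA (fun x => x) false).length = sA.length :=
    (PySem.List.sorted_perm sA (fun x => x) false).length_eq
  omega

-- A's wins are never negative (they beat the initial -1)
theorem wA_nonneg (dice : List (List Int)) (n : Nat) (ga : List Nat) : 0 ≤ wA dice n ga := by
  unfold wA
  rw [winsA_eq _ _ (by simpa using PySem.List.sorted_pairwise _ (fun x => x))]
  apply List.sum_nonneg
  intro x hx
  obtain ⟨y, _, rfl⟩ := List.mem_map.mp hx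
  exact Int.natCast_nonneg _

-- the running-best fold (A) tracks the first strict argmax fold (B)
theorem sel_lemma (w : List Nat → Int) :
    ∀ (l : List (List Nat)) (g : List Nat),
      l.foldl (fun (st : Option (List Nat) × Int) c =>
          if w c > st.2 then (some c, w c) else st) (some g, w g)
        = (some (l.foldl (fun (st : List Nat × Int) c =>
            if w c > st.2 then (c, w c) else st) (g, w g)).1,
           (l.foldl (fun (st : List Nat × Int) c =>
            if w c > st.2 then (c, w c) else st) (g, w g)).2) := by
  intro l
  induction l with
  | nil => intro g; simp
  | cons c t ih =>
    intro g
    simp only [List.foldl_cons]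
    by_cases h : w c > w g
    · simp only [h, if_pos]; exact ih c
    · simp only [h, ite_false]; exact ih g

-- DFS with explicit tail: combinations over a range', unrolled one level
theorem combos_unfold (nn k : Nat) :
    ∀ (m start : Nat), start + m = nn →
      PySem.List.combinations (List.range' start m) (k + 1)
        = (List.range' start m).flatMap
            (fun x => (PySem.List.combinations (List.range' (x + 1) (nn - (x + 1))) k).map
              (fun t => x :: t)) := by
  intro m
  induction m with
  | zero => intro start h; simp [PySem.List.combinations_nil_succ]
  | succ m ih =>
    intro start h
    rw [List.range'_succ]
    rw [PySem.List.combinations_cons_succ]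
    rw [List.flatMap_cons]
    have hm : nn - (start + 1) = m := by omega
    rw [hm, ih (start + 1) (by omega)]

-- B's DFS enumerates exactly itertools.combinations, in the same order
theorem groupsB_eq (n : Nat) :
    ∀ (k start : Nat), groupsB n start k
      = PySem.List.combinations (List.range' start (n - start)) k := by
  intro k
  induction k with
  | zero =>
    intro start
    rw [groupsB, PySem.List.combinations_zero]
  | succ k ih =>
    intro start
    rw [groupsB]
    by_cases hs : start ≤ n
    · rw [combos_unfold n k (n - start) start (by omega)]
      have hfun : (fun x => (groupsB n (x + 1) k).map (fun t => x :: t))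
          = (fun x => (PySem.List.combinations (List.range' (x + 1) (n - (x + 1))) k).map
              (fun t => x :: t)) := funext (fun x => by rw [ih (x + 1)])
      rw [hfun]
    · have h0 : n - start = 0 := by omega
      simp [h0, PySem.List.combinations_nil_succ]

-- the candidate list is non-empty when there are at least two dice
theorem combinations_ne_nil (xs : List Nat) (k : Nat) (hk : k ≤ xs.length) :
    PySem.List.combinations xs k ≠ [] := by
  have hmem : xs.take k ∈ PySem.List.combinations xs k := by
    rw [PySem.List.mem_combinations_iff]
    exact ⟨List.take_sublist _ _, by rw [List.length_take]; omega⟩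
  exact List.ne_nil_of_mem hmem

-- ===== VERDICT (by name: the statement is the Claim_ definition above) =====
theorem solution_spec : Claim_equal_solution := by
  intro dice _ hpre
  have hn : 2 ≤ dice.length := hpre
  unfold Spec_solution solution solution_alt
  simp only [groupsB_eq]
  have hne : PySem.List.combinations (List.range' 1 (dice.length - 1)) (dice.length / 2 - 1) ≠ [] := by
    apply combinations_ne_nil
    rw [List.length_range']
    omega
  obtain ⟨c0, rest, hcons⟩ := List.exists_cons_of_ne_nil hne
  rw [hcons]
  have hbody : (fun (st : Option (List Nat) × Int) (comb : List Nat) =>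
      let ga := 0 :: comb
      let gb := PySem.List.sorted ((List.range dice.length).filter (fun i => !(ga.contains i))) (fun x => x) false
      let sumsA := getSums dice ga
      let sumsB := PySem.List.sorted (getSums dice gb) (fun x => x) false
      let wins := sumsA.foldl (fun w s => w + (PySem.List.bisectLeft sumsB s : Int)) 0
      if wins > st.2 then (some ga, wins) else st)
      = (fun (st : Option (List Nat) × Int) (comb : List Nat) =>
          if wA dice dice.length (0 :: comb) > st.2
          then (some (0 :: comb), wA dice dice.length (0 :: comb)) else st) := rfl
  rw [hbody]
  rw [List.foldl_cons]
  have hfirst : (if wA dice dice.length (0 :: c0) > (-1 : Int)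
      then (some (0 :: c0), wA dice dice.length (0 :: c0))
      else ((none : Option (List Nat)), (-1 : Int)))
      = (some (0 :: c0), wA dice dice.length (0 :: c0)) := by
    have := wA_nonneg dice dice.length (0 :: c0)
    rw [if_pos (by omega)]
  show (match (rest.foldl _ (if wA dice dice.length (0 :: c0) > (-1 : Int)
      then (some (0 :: c0), wA dice dice.length (0 :: c0))
      else ((none : Option (List Nat)), (-1 : Int)))).1 with
    | some g => g.map (fun x => (x : Int) + 1)
    | none => []) = _
  rw [hfirst]
  rw [show wA dice dice.length = winsOf dice dice.length from funext (wins_agree dice dice.length)]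
  have hmapf : ∀ (init : Option (List Nat) × Int),
      rest.foldl (fun (st : Option (List Nat) × Int) (comb : List Nat) =>
        if winsOf dice dice.length (0 :: comb) > st.2
        then (some (0 :: comb), winsOf dice dice.length (0 :: comb)) else st) init
      = (rest.map (fun c => 0 :: c)).foldl (fun (st : Option (List Nat) × Int) c =>
          if winsOf dice dice.length c > st.2 then (some c, winsOf dice dice.length c) else st) init := by
    intro init
    rw [List.foldl_map]
  rw [hmapf]
  rw [sel_lemma (winsOf dice dice.length) (rest.map (fun c => 0 :: c)) (0 :: c0)]
  simp only [List.map_cons, selectMax]
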